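-- pv_equiv track=rewrite | github.com/obukhalov/hacker_rank | Time_Delta1.py | years_to_sec
-- ===== SOURCE A (Python) =====
-- def intercalary_year(_year):
--     if _year % 4 != 0 or (_year % 100 == 0 and _year % 400 != 0):
--         return False
--     else:
--         return True
--
-- def years_to_sec(_start, _end):
--     _sec = 0
--     for i in range(_start + 1, _end):
--         if intercalary_year(i):
--             _sec += 31622400
--         else:
--             _sec += 31536000
--
--     return _sec
-- ===== SOURCE B (Python) =====
-- def years_to_sec(_start, _end):
--     # Closed form: count of leap years in (lo, hi] is f(hi) - f(lo)
--     # with f(n) = n//4 - n//100 + n//400 (floor division, exact for all ints).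
--     lo, hi = _start, _end - 1
--     if hi <= lo:
--         return 0
--     def f(n):
--         return n // 4 - n // 100 + n // 400
--     return (hi - lo) * 31536000 + (f(hi) - f(lo)) * 86400
-- ===== Notes on version B (the rewrite author's own statement) =====
-- stated objective: faster
-- what changed: Replaces the per-year loop with the closed-form Gregorian leap-year count f(n)=n//4-n//100+n//400, so the sum is computed in O(1) arithmetic.
import Mathlib
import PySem

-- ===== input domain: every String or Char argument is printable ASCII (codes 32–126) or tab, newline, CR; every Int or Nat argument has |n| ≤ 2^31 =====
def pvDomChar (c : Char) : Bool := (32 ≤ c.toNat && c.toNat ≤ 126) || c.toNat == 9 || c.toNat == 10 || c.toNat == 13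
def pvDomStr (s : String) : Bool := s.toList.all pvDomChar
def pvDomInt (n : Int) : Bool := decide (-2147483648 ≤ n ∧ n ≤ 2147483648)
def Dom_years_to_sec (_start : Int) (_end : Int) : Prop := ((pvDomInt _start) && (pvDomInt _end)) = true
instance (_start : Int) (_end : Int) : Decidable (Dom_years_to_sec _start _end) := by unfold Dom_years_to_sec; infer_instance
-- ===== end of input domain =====

-- B replaces A's per-year loop with the closed-form leap count f(n)=n//4-n//100+n//400 (O(1)).

-- ===== PORT A =====
def intercalary_year (_year : Int) : Bool :=
  if PySem.Int.mod _year 4 ≠ 0 ∨ (PySem.Int.mod _year 100 = 0 ∧ PySem.Int.mod _year 400 ≠ 0) then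
    false
  else
    true

def years_to_sec (_start : Int) (_end : Int) : Int :=
  (PySem.List.pyRange (_start + 1) _end 1).foldl
    (fun _sec i => if intercalary_year i then _sec + 31622400 else _sec + 31536000) 0

-- ===== PORT B =====
def pvLeapCount (n : Int) : Int :=
  PySem.Int.floordiv n 4 - PySem.Int.floordiv n 100 + PySem.Int.floordiv n 400

def years_to_sec_alt (_start : Int) (_end : Int) : Int :=
  let lo := _start
  let hi := _end - 1
  if hi ≤ lo then 0
  else (hi - lo) * 31536000 + (pvLeapCount hi - pvLeapCount lo) * 86400

-- ===== PRECONDITION & SPEC =====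
def Spec_years_to_sec (_start : Int) (_end : Int) (out : Int) : Prop := out = years_to_sec_alt _start _end
instance (_start : Int) (_end : Int) (out : Int) : Decidable (Spec_years_to_sec _start _end out) := by unfold Spec_years_to_sec; infer_instance

-- ===== CLAIM (what is proved, stated in full; the proofs are below) =====
def Claim_equal_years_to_sec : Prop := ∀ (_start : Int) (_end : Int), Dom_years_to_sec _start _end → Spec_years_to_sec _start _end (years_to_sec _start _end)

-- ===== LEMMAS AND PROOFS =====

-- one division step: n/k increases by 1 at multiples of k
theorem pvDivStep4 (y : Int) : y / 4 - (y - 1) / 4 = if y % 4 = 0 then 1 else 0 := by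
  split_ifs with h <;> omega

theorem pvDivStep100 (y : Int) : y / 100 - (y - 1) / 100 = if y % 100 = 0 then 1 else 0 := by
  split_ifs with h <;> omega

theorem pvDivStep400 (y : Int) : y / 400 - (y - 1) / 400 = if y % 400 = 0 then 1 else 0 := by
  split_ifs with h <;> omega

-- one leap-count step: f(y) - f(y-1) = 1 if y is a leap year, else 0
theorem pvLeapCount_step (y : Int) :
    pvLeapCount y - pvLeapCount (y - 1) = (if intercalary_year y then 1 else 0) := by
  unfold pvLeapCount intercalary_year
  simp only [PySem.Int.mod_eq_emod_of_pos (by norm_num : (0:Int) < 4),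
      PySem.Int.mod_eq_emod_of_pos (by norm_num : (0:Int) < 100),
      PySem.Int.mod_eq_emod_of_pos (by norm_num : (0:Int) < 400),
      PySem.Int.floordiv_eq_ediv_of_pos (by norm_num : (0:Int) < 4),
      PySem.Int.floordiv_eq_ediv_of_pos (by norm_num : (0:Int) < 100),
      PySem.Int.floordiv_eq_ediv_of_pos (by norm_num : (0:Int) < 400)]
  have h4 := pvDivStep4 y
  have h100 := pvDivStep100 y
  have h400 := pvDivStep400 y
  split_ifs at * <;> simp_all <;> omega

theorem pvLoop_closed (n : Nat) : ∀ (a b : Int), b - a = n →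
    (PySem.List.pyRange a b 1).foldl
      (fun _sec i => if intercalary_year i then _sec + 31622400 else _sec + 31536000) 0
    = (b - a) * 31536000 + (pvLeapCount (b - 1) - pvLeapCount (a - 1)) * 86400 := by
  induction n with
  | zero =>
    intro a b h
    have hba : b = a := by omega
    subst hba
    rw [PySem.List.pyRange_one_eq_nil le_rfl]
    simp
  | succ k ih =>
    intro a b h
    have hab : a ≤ b - 1 := by omega
    have hb : b = (b - 1) + 1 := by omega
    rw [hb, PySem.List.pyRange_one_succ_right hab, List.foldl_append]
    rw [ih a (b - 1) (by omega)]
    simp only [List.foldl_cons, List.foldl_nil]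
    have hstep := pvLeapCount_step (b - 1)
    have e1 : b - 1 + 1 - 1 = b - 1 := by ring
    rw [e1]
    generalize pvLeapCount (b - 1) = p at *
    generalize pvLeapCount (b - 1 - 1) = q at *
    generalize pvLeapCount (a - 1) = r at *
    split_ifs at * <;> omega

-- ===== VERDICT (by name: the statement is the Claim_ definition above) =====
theorem years_to_sec_spec : Claim_equal_years_to_sec := by
  intro s e _
  unfold Spec_years_to_sec years_to_sec years_to_sec_alt
  by_cases h : e - 1 ≤ s
  · rw [PySem.List.pyRange_one_eq_nil (by omega)]
    simp [h]
  · rw [pvLoop_closed (e - (s + 1)).toNat (s + 1) e (by omega)]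
    simp only [if_neg h]
    have h1 : s + 1 - 1 = s := by ring
    rw [h1]
    omega
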